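-- pv_equiv track=rewrite | github.com/cms-L1TK/firmware-hls | emData/generate_MP.py | getTProjAndVMRegions
-- ===== SOURCE A (Python) =====
-- def getTProjAndVMRegions(module):
--     if any(psword in module for psword in ["L1","L2","L3"]): TProjRegion = "BARRELPS"
--     elif any(psword in module for psword in ["L4","L5","L6"]): TProjRegion = "BARREL2S"
--     else: TProjRegion = "DISK"
--
--     if any(psword in module for psword in ["L1","L2","L3","L4","L5","L6"]): VMProjRegion = "BARREL"
--     else: VMProjRegion = "DISK"
--
--     if any(psword in module for psword in ["L1","L2","L3"]): VMStubRegion = "BARRELPS"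
--     elif any(psword in module for psword in ["L4","L5","L6"]): VMStubRegion = "BARREL2S"
--     else: VMStubRegion = "DISK"
--
--     return TProjRegion, VMProjRegion, VMStubRegion
-- ===== SOURCE B (Python) =====
-- def getTProjAndVMRegions(module):
--     # One left-to-right character scan: detect 'L' followed by a digit class,
--     # accumulating two flags; all three labels are derived from the flags.
--     ps = False  # saw L1/L2/L3
--     ss = False  # saw L4/L5/L6
--     prev = None
--     for ch in module:
--         if prev == 'L':
--             if ch == '1' or ch == '2' or ch == '3':
--                 ps = True
--             elif ch == '4' or ch == '5' or ch == '6':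
--                 ss = True
--         prev = ch
--     region = "BARRELPS" if ps else ("BARREL2S" if ss else "DISK")
--     vmproj = "BARREL" if (ps or ss) else "DISK"
--     return region, vmproj, region
-- ===== Notes on version B (the rewrite author's own statement) =====
-- stated objective: alternative
-- what changed: B replaces A's six substring-membership searches with a single left-to-right character scan keeping a previous-character accumulator and two flags ('L' followed by 1-3 / 4-6), from which all three labels are derived.
import Mathlib
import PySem

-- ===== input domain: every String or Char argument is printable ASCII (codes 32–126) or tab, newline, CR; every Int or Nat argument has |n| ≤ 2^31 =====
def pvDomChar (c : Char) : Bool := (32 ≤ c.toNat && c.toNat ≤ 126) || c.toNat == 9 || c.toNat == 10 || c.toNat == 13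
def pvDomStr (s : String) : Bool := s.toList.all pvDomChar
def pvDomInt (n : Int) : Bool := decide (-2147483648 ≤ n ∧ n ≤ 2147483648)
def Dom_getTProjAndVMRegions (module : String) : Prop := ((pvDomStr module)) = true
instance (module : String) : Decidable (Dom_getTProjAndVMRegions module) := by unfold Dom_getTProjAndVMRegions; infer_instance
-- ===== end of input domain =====

-- B: one character scan with a previous-character accumulator replaces A's six substring searches; objective: alternative algorithm.

-- ===== PORT A =====
def getTProjAndVMRegions (module : String) : String × String × String :=
  let tproj : String :=
    if ["L1", "L2", "L3"].any (fun psword => PySem.Str.isIn psword module) then "BARRELPS"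
    else if ["L4", "L5", "L6"].any (fun psword => PySem.Str.isIn psword module) then "BARREL2S"
    else "DISK"
  let vmproj : String :=
    if ["L1", "L2", "L3", "L4", "L5", "L6"].any (fun psword => PySem.Str.isIn psword module) then "BARREL"
    else "DISK"
  let vmstub : String :=
    if ["L1", "L2", "L3"].any (fun psword => PySem.Str.isIn psword module) then "BARRELPS"
    else if ["L4", "L5", "L6"].any (fun psword => PySem.Str.isIn psword module) then "BARREL2S"
    else "DISK"
  (tproj, vmproj, vmstub)

-- ===== PORT B =====
-- the loop body of Source B: state (ps, ss, prev)
def pvScanStep : Bool × Bool × Option Char → Char → Bool × Bool × Option Char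
  | (ps, ss, prev), ch =>
    if prev = some 'L' then
      if ch = '1' ∨ ch = '2' ∨ ch = '3' then (true, ss, some ch)
      else if ch = '4' ∨ ch = '5' ∨ ch = '6' then (ps, true, some ch)
      else (ps, ss, some ch)
    else (ps, ss, some ch)

def getTProjAndVMRegions_alt (module : String) : String × String × String :=
  let st := module.toList.foldl pvScanStep (false, false, none)
  let ps := st.1
  let ss := st.2.1
  let region : String := if ps then "BARRELPS" else if ss then "BARREL2S" else "DISK"
  let vmproj : String := if ps || ss then "BARREL" else "DISK"
  (region, vmproj, region)

-- ===== PRECONDITION & SPEC =====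
def Spec_getTProjAndVMRegions (module : String) (out : String × String × String) : Prop := out = getTProjAndVMRegions_alt module
instance (module : String) (out : String × String × String) : Decidable (Spec_getTProjAndVMRegions module out) := by unfold Spec_getTProjAndVMRegions; infer_instance

-- ===== CLAIM (what is proved, stated in full; the proofs are below) =====
def Claim_equal_getTProjAndVMRegions : Prop := ∀ (module : String), Dom_getTProjAndVMRegions module → Spec_getTProjAndVMRegions module (getTProjAndVMRegions module)

-- ===== LEMMAS AND PROOFS =====

-- a two-character pattern is never inside a list of length < 2
theorem pvIsIn_short (a b : Char) (l : List Char) (h : l.length < 2) :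
    PySem.Chars.isIn [a, b] l = false := by
  rw [PySem.Chars.isIn_eq_false_iff]
  intro hinf
  have := hinf.length_le
  simp at this
  omega

-- peeling one character off the haystack for a two-character pattern
theorem pvIsIn_pair_cons (a b c d : Char) (l : List Char) :
    PySem.Chars.isIn [a, b] (c :: d :: l)
      = (decide (a = c ∧ b = d) || PySem.Chars.isIn [a, b] (d :: l)) := by
  by_cases h : (a = c ∧ b = d)
  · obtain ⟨rfl, rfl⟩ := h
    simp [PySem.Chars.isIn_iff_infix]
    exact ⟨[], l, rfl⟩
  · simp only [h, decide_false, Bool.false_or]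
    rw [Bool.eq_iff_iff, PySem.Chars.isIn_iff_infix, PySem.Chars.isIn_iff_infix]
    constructor
    · intro hinf
      rcases List.infix_cons_iff.mp hinf with hp | hinf'
      · exfalso
        rcases List.cons_prefix_cons.mp hp with ⟨rfl, hp2⟩
        rcases List.cons_prefix_cons.mp hp2 with ⟨rfl, _⟩
        exact h ⟨rfl, rfl⟩
      · exact hinf'
    · intro hinf; exact hinf.trans ⟨[c], [], by simp⟩

-- the three PS / 2S flags as substring tests
def pvPS (l : List Char) : Bool :=
  PySem.Chars.isIn ['L', '1'] l || PySem.Chars.isIn ['L', '2'] l || PySem.Chars.isIn ['L', '3'] l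
def pvSS (l : List Char) : Bool :=
  PySem.Chars.isIn ['L', '4'] l || PySem.Chars.isIn ['L', '5'] l || PySem.Chars.isIn ['L', '6'] l

-- one step of the scan, written with the pair-detection booleans
theorem pvScanStep_eq (ps ss : Bool) (p c : Char) :
    pvScanStep (ps, ss, some p) c
      = (ps || (decide (p = 'L') && (decide (c = '1') || decide (c = '2') || decide (c = '3'))),
         ss || (decide (p = 'L') && (decide (c = '4') || decide (c = '5') || decide (c = '6'))),
         some c) := by
  by_cases hp : p = 'L'
  · subst hp
    by_cases h1 : c = '1'
    · subst h1; simp [pvScanStep]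
    · by_cases h2 : c = '2'
      · subst h2; simp [pvScanStep]
      · by_cases h3 : c = '3'
        · subst h3; simp [pvScanStep]
        · by_cases h4 : c = '4'
          · subst h4; simp [pvScanStep]
          · by_cases h5 : c = '5'
            · subst h5; simp [pvScanStep]
            · by_cases h6 : c = '6'
              · subst h6; simp [pvScanStep]
              · simp [pvScanStep, h1, h2, h3, h4, h5, h6]
  · simp [pvScanStep, hp]

-- the scan loop computes exactly the substring flags over prev :: rest
theorem pvScan_fold (l : List Char) : ∀ (ps ss : Bool) (p : Char),
    l.foldl pvScanStep (ps, ss, some p)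
      = (ps || pvPS (p :: l), ss || pvSS (p :: l), some (l.getLastD p)) := by
  induction l with
  | nil =>
    intro ps ss p
    simp [pvPS, pvSS, pvIsIn_short]
  | cons c t ih =>
    intro ps ss p
    have hPS : pvPS (p :: c :: t)
        = ((decide (p = 'L') && (decide (c = '1') || decide (c = '2') || decide (c = '3'))) || pvPS (c :: t)) := by
      clear ih
      simp only [pvPS, pvIsIn_pair_cons]
      by_cases hL : 'L' = p <;> by_cases h1 : '1' = c <;> by_cases h2 : '2' = c <;>
        by_cases h3 : '3' = c <;> simp_all [eq_comm]
    have hSS : pvSS (p :: c :: t)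
        = ((decide (p = 'L') && (decide (c = '4') || decide (c = '5') || decide (c = '6'))) || pvSS (c :: t)) := by
      clear ih
      simp only [pvSS, pvIsIn_pair_cons]
      by_cases hL : 'L' = p <;> by_cases h4 : '4' = c <;> by_cases h5 : '5' = c <;>
        by_cases h6 : '6' = c <;> simp_all [eq_comm]
    rw [List.foldl_cons, pvScanStep_eq, ih, hPS, hSS]
    simp only [Bool.or_assoc, Prod.mk.injEq, Option.some.injEq, true_and]
    cases t with
    | nil => simp
    | cons d u =>
      obtain ⟨x, hx⟩ := Option.isSome_iff_exists.mp
        ((List.getLast?_isSome (l := d :: u)).mpr (by simp))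
      simp [hx]

-- the full scan from the initial state
theorem pvScan_main (l : List Char) :
    (l.foldl pvScanStep (false, false, none)).1 = pvPS l ∧
    (l.foldl pvScanStep (false, false, none)).2.1 = pvSS l := by
  cases l with
  | nil => simp [pvPS, pvSS, pvIsIn_short]
  | cons c t =>
    rw [List.foldl_cons]
    have hstep : pvScanStep (false, false, none) c = (false, false, some c) := by
      simp [pvScanStep]
    rw [hstep, pvScan_fold]
    simp

-- ===== VERDICT (by name: the statement is the Claim_ definition above) =====
theorem getTProjAndVMRegions_spec : Claim_equal_getTProjAndVMRegions := by
  intro module _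
  unfold Spec_getTProjAndVMRegions getTProjAndVMRegions getTProjAndVMRegions_alt
  obtain ⟨hps, hss⟩ := pvScan_main module.toList
  simp only [List.any_cons, List.any_nil, Bool.or_false, PySem.Str.isIn_eq, hps, hss,
    pvPS, pvSS]
  by_cases h1 : PySem.Chars.isIn ['L', '1'] module.toList = true <;>
    by_cases h2 : PySem.Chars.isIn ['L', '2'] module.toList = true <;>
    by_cases h3 : PySem.Chars.isIn ['L', '3'] module.toList = true <;>
    by_cases h4 : PySem.Chars.isIn ['L', '4'] module.toList = true <;>
    by_cases h5 : PySem.Chars.isIn ['L', '5'] module.toList = true <;>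
    by_cases h6 : PySem.Chars.isIn ['L', '6'] module.toList = true <;>
    simp [h1, h2, h3, h4, h5, h6]
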